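-- pv_equiv track=rewrite | github.com/limgeonho/SWEA_algorithm_practice | 1005/L5203_HW_베이비진게임/임건호.py | check
-- ===== SOURCE A (Python) =====
-- def check(p):
--     for i in range(len(p)):
--         if p[i] == 3:
--             return True
--
--     for j in range(len(p)-2):
--         if p[j] and p[j+1] and p[j+2]:
--             return True
--
--     return False
-- ===== SOURCE B (Python) =====
-- def check(p):
--     run = 0
--     for x in p:
--         if x == 3:
--             return True
--         if x != 0:
--             run += 1
--             if run == 3:
--                 return True
--         else:
--             run = 0
--     return False
-- ===== Notes on version B (the rewrite author's own statement) =====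
-- stated objective: simpler
-- what changed: Replaces A's two passes (one scanning for a 3, one sliding a three-element window via indices) with a single pass keeping a run-length counter of consecutive nonzero entries, returning True on a 3 or when the counter reaches 3.
import Mathlib
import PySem

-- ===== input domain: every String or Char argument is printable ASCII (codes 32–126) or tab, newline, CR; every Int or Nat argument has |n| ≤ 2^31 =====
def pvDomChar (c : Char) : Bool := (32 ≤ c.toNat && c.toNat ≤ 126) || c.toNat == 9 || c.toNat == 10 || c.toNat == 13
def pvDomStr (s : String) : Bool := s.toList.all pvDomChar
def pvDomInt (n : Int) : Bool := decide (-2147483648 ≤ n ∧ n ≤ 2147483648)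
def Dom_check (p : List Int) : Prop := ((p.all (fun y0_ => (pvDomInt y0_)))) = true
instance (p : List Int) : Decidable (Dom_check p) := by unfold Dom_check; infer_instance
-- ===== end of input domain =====

-- B replaces A's two index-based passes (scan for a 3, then slide a 3-wide window) with one
-- pass keeping a run-length counter of consecutive nonzero entries (objective: simpler).


-- ===== PORT A =====
-- first loop: for i in range(len(p)): if p[i] == 3: return True   (visits the elements in order)
def checkLoop1 : List Int → Bool
  | [] => false
  | x :: rest => if x == 3 then true else checkLoop1 rest

-- second loop: for j in range(len(p)-2): if p[j] and p[j+1] and p[j+2]: return True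
-- (visits the windows (p[j],p[j+1],p[j+2]) in order; truthiness of an int = nonzero)
def checkLoop2 : List Int → Bool
  | a :: b :: c :: rest => if a ≠ 0 ∧ b ≠ 0 ∧ c ≠ 0 then true else checkLoop2 (b :: c :: rest)
  | _ => false
termination_by l => l.length

def check (p : List Int) : Bool :=
  if checkLoop1 p then true
  else if checkLoop2 p then true
  else false

-- ===== PORT B =====
-- single pass with a run-length counter `run` of consecutive nonzero entries
def checkAltLoop : List Int → Int → Bool
  | [], _ => false
  | x :: rest, run =>
    if x == 3 then true
    else if x ≠ 0 then
      (if run + 1 == 3 then true else checkAltLoop rest (run + 1))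
    else checkAltLoop rest 0

def check_alt (p : List Int) : Bool := checkAltLoop p 0

-- ===== PRECONDITION & SPEC =====
def Spec_check (p : List Int) (out : Bool) : Prop := out = check_alt p
instance (p : List Int) (out : Bool) : Decidable (Spec_check p out) := by unfold Spec_check; infer_instance

-- ===== CLAIM (what is proved, stated in full; the proofs are below) =====
def Claim_equal_check : Prop := ∀ (p : List Int), Dom_check p → Spec_check p (check p)

-- ===== LEMMAS AND PROOFS =====

-- pref n l: the first n entries of l exist and are all nonzero
def pref : Nat → List Int → Bool
  | 0, _ => true
  | _ + 1, [] => false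
  | n + 1, x :: xs => decide (x ≠ 0) && pref n xs

theorem pref_mono {k m : Nat} (h : k ≤ m) : ∀ (l : List Int), pref m l = true → pref k l = true := by
  induction m generalizing k with
  | zero => intro l _; interval_cases k; rfl
  | succ m ih =>
    intro l hp
    cases k with
    | zero => rfl
    | succ k =>
      cases l with
      | nil => simp [pref] at hp
      | cons x xs =>
        simp [pref] at hp ⊢
        exact ⟨hp.1, ih (Nat.succ_le_succ_iff.mp h) xs hp.2⟩

theorem pref3_loop2 : ∀ (l : List Int), pref 3 l = true → checkLoop2 l = true := by
  intro l hp
  match l with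
  | [] | [_] | [_, _] => simp [pref] at hp
  | a :: b :: c :: r =>
    simp [pref] at hp
    simp [checkLoop2, hp.1, hp.2.1, hp.2.2]

theorem loop2_cons (x : Int) (xs : List Int) :
    checkLoop2 (x :: xs) = ((decide (x ≠ 0) && pref 2 xs) || checkLoop2 xs) := by
  match xs with
  | [] => simp [checkLoop2, pref]
  | [b] => simp [checkLoop2, pref]
  | b :: c :: r =>
    by_cases hx : x = 0 <;> by_cases hb : b = 0 <;> by_cases hc : c = 0 <;>
      simp [checkLoop2, pref, hx, hb, hc]

theorem loop1_any : ∀ (l : List Int), checkLoop1 l = l.any (fun x => x == 3) := by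
  intro l
  induction l with
  | nil => rfl
  | cons x xs ih =>
    by_cases h : x = 3 <;> simp [checkLoop1, h, ih]

theorem altLoop_spec : ∀ (l : List Int) (n : Nat), n ≤ 2 →
    checkAltLoop l (n : Int) =
      (l.any (fun x => x == 3) || pref (3 - n) l || checkLoop2 l) := by
  intro l
  induction l with
  | nil =>
    intro n hn
    obtain ⟨m, hm⟩ : ∃ m, 3 - n = m + 1 := ⟨2 - n, by omega⟩
    rw [hm]
    simp [checkAltLoop, checkLoop2, pref]
  | cons x xs ih =>
    intro n hn
    by_cases h3 : x = 3
    · simp [checkAltLoop, h3]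
    · by_cases h0 : x = 0
      · -- x = 0: counter resets; any window through x is dead
        have h1 : checkAltLoop (x :: xs) (n : Int) = checkAltLoop xs ((0 : Nat) : Int) := by
          simp [checkAltLoop, h3, h0]
        have hpz : pref (3 - n) (x :: xs) = false := by
          obtain ⟨m, hm⟩ : ∃ m, 3 - n = m + 1 := ⟨2 - n, by omega⟩
          rw [hm]; simp [pref, h0]
        rw [h1, ih 0 (by omega), loop2_cons, hpz]
        have hx3 : (x == 3) = false := by simp [h3]
        cases hp : pref 3 xs
        · simp [hx3, h0, hp]
        · simp [hx3, h0, hp, pref3_loop2 xs hp]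
      · -- x nonzero, not 3
        rcases Nat.lt_or_ge n 2 with hlt | hge
        · -- run does not reach 3 here
          have h1 : checkAltLoop (x :: xs) (n : Int) = checkAltLoop xs ((n + 1 : Nat) : Int) := by
            have hne : ¬ ((n : Int) + 1 == 3) = true := by simp; omega
            simp [checkAltLoop, h3, h0, hne]
          rw [h1, ih (n + 1) (by omega), loop2_cons]
          have he : 3 - n = (2 - n) + 1 := by omega
          have he2 : 3 - (n + 1) = 2 - n := by omega
          rw [he2, he]
          have hx3 : (x == 3) = false := by simp [h3]
          cases hp : pref 2 xs
          · simp [pref, hx3, h0, hp]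
          · simp [pref, hx3, h0, hp, pref_mono (by omega : 2 - n ≤ 2) xs hp]
        · -- n = 2: the run reaches 3 and B returns true; pref 1 (x :: xs) holds
          have hn2 : n = 2 := by omega
          subst hn2
          have h1 : checkAltLoop (x :: xs) ((2 : Nat) : Int) = true := by
            simp [checkAltLoop, h3, h0]
          rw [h1]
          simp [pref, h0]

theorem check_eq : ∀ (p : List Int), check p = check_alt p := by
  intro p
  have hB := altLoop_spec p 0 (by omega)
  have habs : (pref 3 p || checkLoop2 p) = checkLoop2 p := by
    cases hp : pref 3 p
    · simp
    · simp [pref3_loop2 p hp]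
  simp only [Nat.cast_zero] at hB
  rw [check_alt, hB]
  unfold check
  rw [loop1_any]
  cases hA : p.any (fun x => x == 3)
  · simp only [Nat.sub_zero]
    cases hp : pref 3 p
    · cases h2 : checkLoop2 p <;> simp [hp, h2]
    · simp [pref3_loop2 p hp]
  · simp

-- ===== VERDICT (by name: the statement is the Claim_ definition above) =====
theorem check_spec : Claim_equal_check := by
  intro p _
  show check p = check_alt p
  exact check_eq p
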